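-- pv_equiv track=rewrite | github.com/russelljjarvis/sirg_geo_net | chord2.py | get_ideogram_ends
-- ===== SOURCE A (Python) =====
-- def get_ideogram_ends(ideaogram_len, gap):
--     ideo_ends = []
--     left = 0
--     for k in range(len(ideaogram_len)):
--         right = left + ideaogram_len[k]
--         ideo_ends.append([left, right])
--         left = right + gap
--     return ideo_ends
-- ===== SOURCE B (Python) =====
-- def get_ideogram_ends(ideaogram_len, gap):
--     # prefix[k] = sum of the first k lengths; gaps are added as k*gap per interval
--     prefix = [0]
--     for L in ideaogram_len:
--         prefix.append(prefix[-1] + L)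
--     return [[prefix[k] + k * gap, prefix[k + 1] + k * gap]
--             for k in range(len(ideaogram_len))]
-- ===== Notes on version B (the rewrite author's own statement) =====
-- stated objective: alternative
-- what changed: Replaces the single running-'left' loop by a prefix-sum table of lengths plus a k*gap offset computed per interval in a second pass.
import Mathlib
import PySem

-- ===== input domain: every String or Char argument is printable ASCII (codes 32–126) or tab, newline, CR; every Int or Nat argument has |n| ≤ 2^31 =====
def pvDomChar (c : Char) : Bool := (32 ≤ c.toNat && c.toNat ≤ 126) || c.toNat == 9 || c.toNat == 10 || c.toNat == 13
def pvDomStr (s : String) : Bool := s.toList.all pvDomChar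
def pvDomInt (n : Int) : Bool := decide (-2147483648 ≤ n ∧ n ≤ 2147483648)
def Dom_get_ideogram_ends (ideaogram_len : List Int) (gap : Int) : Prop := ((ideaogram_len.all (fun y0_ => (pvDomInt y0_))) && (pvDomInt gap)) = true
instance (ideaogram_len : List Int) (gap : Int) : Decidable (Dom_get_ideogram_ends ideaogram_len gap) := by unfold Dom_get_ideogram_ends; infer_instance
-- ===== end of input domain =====

-- B replaces A's running-'left' loop by a prefix-sum table of lengths plus a k*gap offset per interval (alternative decomposition, same cost).
-- ===== PORT A =====
-- A's loop: left starts at 0; each step emits [left, left + len[k]] and sets left := right + gap.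
def pvGoA (gap : Int) : List Int → Int → List (List Int)
  | [], _ => []
  | x :: xs, left => [left, left + x] :: pvGoA gap xs (left + x + gap)

def get_ideogram_ends (ideaogram_len : List Int) (gap : Int) : List (List Int) :=
  pvGoA gap ideaogram_len 0

-- ===== PORT B =====
-- prefix table of cumulative sums starting at acc (Source B builds [0, 0+l0, 0+l0+l1, ...])
def pvPrefix (acc : Int) : List Int → List Int
  | [] => [acc]
  | x :: xs => acc :: pvPrefix (acc + x) xs

def get_ideogram_ends_alt (ideaogram_len : List Int) (gap : Int) : List (List Int) :=
  let pre := pvPrefix 0 ideaogram_len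
  (List.range ideaogram_len.length).map
    (fun k => [pre.getD k 0 + (k : Int) * gap, pre.getD (k + 1) 0 + (k : Int) * gap])

-- ===== PRECONDITION & SPEC =====
def Spec_get_ideogram_ends (ideaogram_len : List Int) (gap : Int) (out : List (List Int)) : Prop := out = get_ideogram_ends_alt ideaogram_len gap
instance (ideaogram_len : List Int) (gap : Int) (out : List (List Int)) : Decidable (Spec_get_ideogram_ends ideaogram_len gap out) := by unfold Spec_get_ideogram_ends; infer_instance

-- ===== CLAIM (what is proved, stated in full; the proofs are below) =====
def Claim_equal_get_ideogram_ends : Prop := ∀ (ideaogram_len : List Int) (gap : Int), Dom_get_ideogram_ends ideaogram_len gap → Spec_get_ideogram_ends ideaogram_len gap (get_ideogram_ends ideaogram_len gap)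

-- ===== LEMMAS AND PROOFS =====

-- ===== VERDICT (by name: the statement is the Claim_ definition above) =====
lemma pvKey (gap : Int) (l : List Int) (a b : Int) :
    pvGoA gap l (a + b) =
      (List.range l.length).map
        (fun k => [(pvPrefix a l).getD k 0 + b + (k : Int) * gap,
                   (pvPrefix a l).getD (k + 1) 0 + b + (k : Int) * gap]) := by
  induction l generalizing a b with
  | nil => simp [pvGoA]
  | cons x xs ih =>
    simp only [pvGoA, pvPrefix, List.length_cons, List.range_succ_eq_map,
      List.map_cons, List.map_map]
    refine List.cons_eq_cons.mpr ⟨?_, ?_⟩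
    · cases xs <;> simp [pvPrefix] <;> ring_nf
    · have h : a + b + x + gap = (a + x) + (b + gap) := by ring
      rw [h, ih (a + x) (b + gap)]
      apply List.map_congr_left
      intro k _
      simp only [Function.comp]
      simp only [Nat.succ_eq_add_one, List.getD_cons_succ]
      push_cast; ring_nf

theorem get_ideogram_ends_spec : Claim_equal_get_ideogram_ends := by
  intro l gap _
  unfold Spec_get_ideogram_ends get_ideogram_ends get_ideogram_ends_alt
  have := pvKey gap l 0 0
  simp only [Int.add_zero] at this
  simpa using this
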